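-- pv_equiv track=rewrite | github.com/mohamedelsayed-0/ESC180 | Midterm_Prep/lab04.py | make_guesses
-- ===== SOURCE A (Python) =====
-- def make_guesses(hats):
--     guesses = []
--     n = len(hats)
--     for i in range(n):
--         hats_seen = 0
--         for j in range(n):
--             if i != j and hats[j] == "W":
--                 hats_seen += 1
--
--         if hats_seen % 2 == 0:
--             guesses.append("B")
--         else:
--             guesses.append("W")
--
--     return guesses
-- ===== SOURCE B (Python) =====
-- def make_guesses(hats):
--     total = hats.count("W")
--     return ["B" if (total - (h == "W")) % 2 == 0 else "W" for h in hats]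
-- ===== Notes on version B (the rewrite author's own statement) =====
-- stated objective: faster
-- what changed: Replaces the quadratic nested scan (re-counting the other hats for every person) by one count of white hats followed by a single pass that subtracts the person's own hat.
import Mathlib
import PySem

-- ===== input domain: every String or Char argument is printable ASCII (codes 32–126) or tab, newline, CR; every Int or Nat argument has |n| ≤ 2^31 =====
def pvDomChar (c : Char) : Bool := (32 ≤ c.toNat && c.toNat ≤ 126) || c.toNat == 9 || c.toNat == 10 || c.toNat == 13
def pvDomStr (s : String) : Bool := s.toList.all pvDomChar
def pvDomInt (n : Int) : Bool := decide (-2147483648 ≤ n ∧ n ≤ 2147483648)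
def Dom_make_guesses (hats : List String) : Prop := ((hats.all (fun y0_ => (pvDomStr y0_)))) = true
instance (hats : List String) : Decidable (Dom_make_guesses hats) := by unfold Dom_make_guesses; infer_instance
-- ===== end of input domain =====

-- B replaces A's quadratic nested re-count by one total white-hat count plus a single pass (faster, asymptotic).


-- ===== PORT A =====
def make_guesses (hats : List String) : List String :=
  let n : Int := hats.length
  (PySem.List.pyRange 0 n 1).foldl (fun guesses i =>
    let hats_seen : Int :=
      (PySem.List.pyRange 0 n 1).foldl (fun acc j =>
        if i ≠ j ∧ PySem.List.pyGetD hats j "" = "W" then acc + 1 else acc) 0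
    if PySem.Int.mod hats_seen 2 = 0 then guesses ++ ["B"] else guesses ++ ["W"]) []

-- ===== PORT B =====
def make_guesses_alt (hats : List String) : List String :=
  let total : Int := hats.count "W"
  hats.map (fun h =>
    if PySem.Int.mod (total - (if h = "W" then 1 else 0)) 2 = 0 then "B" else "W")

-- ===== PRECONDITION & SPEC =====
def Spec_make_guesses (hats : List String) (out : List String) : Prop := out = make_guesses_alt hats
instance (hats : List String) (out : List String) : Decidable (Spec_make_guesses hats out) := by unfold Spec_make_guesses; infer_instance

-- ===== CLAIM (what is proved, stated in full; the proofs are below) =====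
def Claim_equal_make_guesses : Prop := ∀ (hats : List String), Dom_make_guesses hats → Spec_make_guesses hats (make_guesses hats)

-- ===== LEMMAS AND PROOFS =====

-- A's inner loop count for person i equals total white count minus i's own hat.
theorem inner_count (hats : List String) (i : Int) (h0 : 0 ≤ i) (hn : i < (hats.length : Int)) :
    ((PySem.List.pyRange 0 (hats.length : Int) 1).countP
        (fun j => decide (i ≠ j ∧ PySem.List.pyGetD hats j "" = "W")) : Int)
      = (hats.count "W" : Int) - (if PySem.List.pyGetD hats i "" = "W" then 1 else 0) := by
  have hsplit : PySem.List.pyRange 0 (hats.length : Int) 1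
      = PySem.List.pyRange 0 i 1 ++ PySem.List.pyRange i (hats.length : Int) 1 :=
    PySem.List.pyRange_one_append _ _ _ h0 (le_of_lt hn)
  have hcons : PySem.List.pyRange i (hats.length : Int) 1
      = i :: PySem.List.pyRange (i+1) (hats.length : Int) 1 :=
    PySem.List.pyRange_one_cons hn
  -- on the left segment and right segment, i ≠ j is always true
  have hleft : (PySem.List.pyRange 0 i 1).countP
      (fun j => decide (i ≠ j ∧ PySem.List.pyGetD hats j "" = "W"))
      = (PySem.List.pyRange 0 i 1).countP (fun j => decide (PySem.List.pyGetD hats j "" = "W")) := by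
    apply List.countP_congr
    intro j hj
    have := (PySem.List.mem_pyRange_one).1 hj
    simp only [decide_eq_true_eq]
    constructor
    · rintro ⟨_, h⟩; exact h
    · intro h; exact ⟨by omega, h⟩
  have hright : (PySem.List.pyRange (i+1) (hats.length : Int) 1).countP
      (fun j => decide (i ≠ j ∧ PySem.List.pyGetD hats j "" = "W"))
      = (PySem.List.pyRange (i+1) (hats.length : Int) 1).countP (fun j => decide (PySem.List.pyGetD hats j "" = "W")) := by
    apply List.countP_congr
    intro j hj
    have := (PySem.List.mem_pyRange_one).1 hj
    simp only [decide_eq_true_eq]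
    constructor
    · rintro ⟨_, h⟩; exact h
    · intro h; exact ⟨by omega, h⟩
  have htot : ((PySem.List.pyRange 0 (hats.length : Int) 1).countP
      (fun j => decide (PySem.List.pyGetD hats j "" = "W")) : Int) = (hats.count "W" : Int) := by
    have hmap : (PySem.List.pyRange 0 (hats.length : Int) 1).map
        (fun j => PySem.List.pyGetD hats j "") = hats := PySem.List.map_pyGetD_pyRange_zero hats ""
    have : hats.countP (fun h => decide (h = "W"))
        = (PySem.List.pyRange 0 (hats.length : Int) 1).countP
            (fun j => decide (PySem.List.pyGetD hats j "" = "W")) := by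
      conv_lhs => rw [← hmap]
      rw [List.countP_map]; rfl
    rw [← this, List.count_eq_countP]
    norm_cast
  rw [hsplit, hcons, List.countP_append, List.countP_cons, hleft, hright]
  have hii : (decide (i ≠ i ∧ PySem.List.pyGetD hats i "" = "W")) = false := by
    simp
  rw [hii]
  rw [hsplit, hcons, List.countP_append, List.countP_cons] at htot
  have hone : (decide (PySem.List.pyGetD hats i "" = "W"))
      = (if PySem.List.pyGetD hats i "" = "W" then (true:Bool) else false) := by
    by_cases h : PySem.List.pyGetD hats i "" = "W" <;> simp [h]
  by_cases h : PySem.List.pyGetD hats i "" = "W" <;>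
    · simp [h] at htot ⊢; omega

-- ===== VERDICT (by name: the statement is the Claim_ definition above) =====
theorem make_guesses_spec : Claim_equal_make_guesses := by
  intro hats _
  unfold Spec_make_guesses make_guesses make_guesses_alt
  simp only []
  have hbody : ∀ (acc : List String) (i : Int), i ∈ PySem.List.pyRange 0 (hats.length : Int) 1 →
      (fun guesses i =>
        if PySem.Int.mod
            ((PySem.List.pyRange 0 (hats.length : Int) 1).foldl (fun acc j =>
              if i ≠ j ∧ PySem.List.pyGetD hats j "" = "W" then acc + 1 else acc) 0) 2 = 0
          then guesses ++ ["B"] else guesses ++ ["W"]) acc i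
      = acc ++ [if PySem.Int.mod
            ((PySem.List.pyRange 0 (hats.length : Int) 1).foldl (fun acc j =>
              if i ≠ j ∧ PySem.List.pyGetD hats j "" = "W" then acc + 1 else acc) 0) 2 = 0
          then "B" else "W"] := by
    intro acc i _
    dsimp only []
    split_ifs <;> rfl
  rw [PySem.List.foldl_congr_mem _ _ _ _ hbody, PySem.List.foldl_append_singleton_eq_map,
    List.nil_append]
  have hmap : (PySem.List.pyRange 0 (hats.length : Int) 1).map
      (fun j => PySem.List.pyGetD hats j "") = hats := PySem.List.map_pyGetD_pyRange_zero hats ""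
  have h2 : (PySem.List.pyRange 0 (hats.length : Int) 1).map
      (fun i => if PySem.Int.mod
          ((PySem.List.pyRange 0 (hats.length : Int) 1).foldl (fun acc j =>
            if i ≠ j ∧ PySem.List.pyGetD hats j "" = "W" then acc + 1 else acc) 0) 2 = 0
        then "B" else "W")
      = (PySem.List.pyRange 0 (hats.length : Int) 1).map
      ((fun h => if PySem.Int.mod ((hats.count "W" : Int) - if h = "W" then 1 else 0) 2 = 0
          then "B" else "W") ∘ (fun j => PySem.List.pyGetD hats j "")) := by
    apply List.map_congr_left
    intro i hi
    have hb := (PySem.List.mem_pyRange_one).1 hi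
    rw [PySem.List.foldl_ite_add_one, zero_add, inner_count hats i hb.1 hb.2]
    rfl
  rw [h2, ← List.map_map, hmap]
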